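-- pv_equiv track=rewrite | github.com/SepuNelson/UTFSM-Academico | IWI131 Introducción a la Programación/Certámenes/Certamen 1/Certamen 1b.py | votos_partido
-- ===== SOURCE A (Python) =====
-- def votos_partido(votos, partido):
--     c = 0
--     i = 0
--     f = 0
--     votos = votos + "$"
--     while f < len (votos):
--         if votos[f] == "$":
--             v = votos[i:f]
--             i = f + 1
--             if partido == v:
--                 c += 1
--         f += 1
--     return c
-- ===== SOURCE B (Python) =====
-- def votos_partido(votos, partido):
--     tokens = votos.split("$")
--     return tokens.count(partido)
-- ===== Notes on version B (the rewrite author's own statement) =====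
-- stated objective: simpler
-- what changed: Replaces the fused per-character scan with sentinel append, index tracking and manual slicing by a two-phase decomposition: build the token list with str.split('$'), then count matches with list.count.
import Mathlib
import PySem

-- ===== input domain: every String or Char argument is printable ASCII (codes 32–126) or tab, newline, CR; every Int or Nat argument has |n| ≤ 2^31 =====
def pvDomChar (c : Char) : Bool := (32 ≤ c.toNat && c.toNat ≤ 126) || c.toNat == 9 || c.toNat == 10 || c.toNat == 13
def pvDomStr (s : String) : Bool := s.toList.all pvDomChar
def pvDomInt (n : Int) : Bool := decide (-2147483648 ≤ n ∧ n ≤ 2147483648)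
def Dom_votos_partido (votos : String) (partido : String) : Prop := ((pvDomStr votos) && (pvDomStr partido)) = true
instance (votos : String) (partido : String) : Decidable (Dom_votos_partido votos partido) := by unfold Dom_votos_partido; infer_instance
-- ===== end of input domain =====

-- B replaces A's fused character scan (sentinel append, index tracking, manual slicing)
-- by a two-phase decomposition: split on "$" into the token list, then count matches.


-- ===== PORT A =====
-- the while loop: state (c, i, f), scanning s = votos + "$" character by character
def pvGoA (s p : List Char) (c : Int) (i f : Nat) : Int :=
  if h : f < s.length then
    if PySem.List.pyGet? s (f : Int) = some '$' then      -- votos[f] == "$" (f in range)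
      let v := PySem.List.slice s (some (i : Int)) (some (f : Int))   -- v = votos[i:f]
      pvGoA s p (if p = v then c + 1 else c) (f + 1) (f + 1)
    else
      pvGoA s p c i (f + 1)
  else c
termination_by s.length - f
decreasing_by all_goals omega

def votos_partido (votos : String) (partido : String) : Int :=
  -- votos = votos + "$": ported on code points, (votos + "$").toList = votos.toList ++ ['$']
  pvGoA (votos.toList ++ ['$']) partido.toList 0 0 0

-- ===== PORT B =====
def votos_partido_alt (votos : String) (partido : String) : Int :=
  -- tokens = votos.split("$")  ("$" is non-empty, so split? always returns some)
  let tokens := (PySem.Str.split? votos "$").getD []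
  -- return tokens.count(partido)
  (tokens.count partido : Int)

-- ===== PRECONDITION & SPEC =====
def Spec_votos_partido (votos : String) (partido : String) (out : Int) : Prop := out = votos_partido_alt votos partido
instance (votos : String) (partido : String) (out : Int) : Decidable (Spec_votos_partido votos partido out) := by unfold Spec_votos_partido; infer_instance

-- ===== CLAIM (what is proved, stated in full; the proofs are below) =====
def Claim_equal_votos_partido : Prop := ∀ (votos : String) (partido : String), Dom_votos_partido votos partido → Spec_votos_partido votos partido (votos_partido votos partido)

-- ===== LEMMAS AND PROOFS =====

-- tokens of l split at '$': first token × remaining tokens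
def pvToks : List Char → List Char × List (List Char)
  | [] => ([], [])
  | c :: rest =>
      if c = '$' then ([], (pvToks rest).1 :: (pvToks rest).2)
      else (c :: (pvToks rest).1, (pvToks rest).2)

-- abstract form of A's loop: pre = current partial token, rem = characters still to scan
def pvCnt (p : List Char) : List Char → List Char → Int
  | pre, [] => 0
  | pre, c :: rest =>
      if c = '$' then (if p = pre then 1 else 0) + pvCnt p [] rest
      else pvCnt p (pre ++ [c]) rest

lemma pvGoA_eq (s p : List Char) : ∀ (n : Nat) (c : Int) (i f : Nat), i ≤ f → f ≤ s.length →
    s.length - f = n → pvGoA s p c i f = c + pvCnt p ((s.drop i).take (f - i)) (s.drop f) := by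
  intro n
  induction n with
  | zero =>
      intro c i f hif hfl hn
      have hf : f = s.length := by omega
      rw [pvGoA]
      simp [hf, pvCnt]
  | succ n ih =>
      intro c i f hif hfl hn
      have hf : f < s.length := by omega
      have hdrop : s.drop f = s[f] :: s.drop (f + 1) := List.drop_eq_getElem_cons hf
      rw [pvGoA]
      have hget : PySem.List.pyGet? s (f : Int) = some s[f] := by
        simp [PySem.List.pyGet?_natCast, List.getElem?_eq_getElem hf]
      rw [dif_pos hf, hget]
      have hslice : PySem.List.slice s (some (i : Int)) (some (f : Int)) =
          (s.drop i).take (f - i) := by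
        rw [PySem.List.slice_toNat] <;> simp
      by_cases hc : s[f] = '$'
      · rw [if_pos (by rw [hc])]
        rw [ih _ (f + 1) (f + 1) le_rfl (by omega) (by omega)]
        rw [hdrop, hslice]
        simp only [pvCnt, hc, if_pos rfl, Nat.sub_self, List.take_zero]
        split_ifs <;> ring
      · rw [if_neg (by simp [hc])]
        rw [ih _ i (f + 1) (by omega) (by omega) (by omega)]
        rw [hdrop]
        have htake : (s.drop i).take (f + 1 - i) = (s.drop i).take (f - i) ++ [s[f]] := by
          have h1 : f + 1 - i = (f - i) + 1 := by omega
          rw [h1, List.take_succ]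
          congr 1
          rw [List.getElem?_drop]
          have : i + (f - i) = f := by omega
          rw [this, List.getElem?_eq_getElem hf]
          rfl
        rw [htake]
        simp [pvCnt, hc]

lemma pvCount_map_ofList (ts : List (List Char)) (p : String) :
    (ts.map String.ofList).count p = ts.count p.toList := by
  conv_lhs => rw [show p = String.ofList p.toList by simp]
  exact List.count_map_of_injective _ _ (fun a b h => by simpa using congrArg String.toList h) _

lemma pvCount_cons_int (a b : List Char) (l : List (List Char)) :
    (((b :: l).count a : Int)) = (if b = a then 1 else 0) + (l.count a : Int) := by
  rw [List.count_cons]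
  push_cast
  split_ifs with h1 h2 <;> simp_all <;> omega

lemma pvCnt_toks (p : List Char) : ∀ (l pre : List Char),
    pvCnt p pre (l ++ ['$']) = (((pre ++ (pvToks l).1) :: (pvToks l).2).count p : Int) := by
  intro l
  induction l with
  | nil =>
      intro pre
      simp only [List.nil_append, pvCnt, pvToks, List.append_nil, if_pos rfl]
      rw [pvCount_cons_int]
      simp only [List.count_nil, Nat.cast_zero]
      split_ifs <;> simp_all
  | cons c rest ih =>
      intro pre
      by_cases hc : c = '$'
      · subst hc
        simp only [List.cons_append, pvCnt, if_pos rfl, ih, pvToks, List.nil_append,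
          List.append_nil]
        conv_rhs => rw [pvCount_cons_int]
        split_ifs <;> simp_all <;> omega
      · simp only [List.cons_append, pvCnt, if_neg hc, ih, pvToks, if_neg hc]
        simp [List.append_assoc]

lemma pvGo_eq : ∀ (fuel : Nat) (l cur : List Char) (acc : List (List Char)), l.length < fuel →
    PySem.Chars.splitOn.go ['$'] fuel l cur acc =
      acc.reverse ++ (cur.reverse ++ (pvToks l).1) :: (pvToks l).2 := by
  intro fuel
  induction fuel with
  | zero => intro l cur acc h; omega
  | succ fuel ih =>
      intro l cur acc h
      cases l with
      | nil =>
          rw [PySem.Chars.splitOn.go]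
          simp [pvToks]
          omega
      | cons c rest =>
          rw [PySem.Chars.splitOn.go]
          by_cases hc : c = '$'
          · have hpre : List.isPrefixOf ['$'] (c :: rest) = true := by
              simp [List.isPrefixOf, hc]
            rw [if_pos hpre]
            simp only [List.length_singleton, List.drop_one, List.tail_cons]
            rw [ih rest [] (cur.reverse :: acc) (by simpa using Nat.lt_of_succ_lt_succ h)]
            simp [pvToks, hc]
          · have hpre : List.isPrefixOf ['$'] (c :: rest) = false := by
              simp [List.isPrefixOf, hc]
              intro h'; exact hc h'.symm
            rw [if_neg (by simp [hpre])]
            rw [ih rest (c :: cur) acc (by simpa using Nat.lt_of_succ_lt_succ h)]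
            simp [pvToks, hc]

lemma pvSplitOn_eq (l : List Char) :
    PySem.Chars.splitOn l ['$'] = (pvToks l).1 :: (pvToks l).2 := by
  rw [PySem.Chars.splitOn, pvGo_eq (l.length + 1) l [] [] (by omega)]
  simp

-- ===== VERDICT (by name: the statement is the Claim_ definition above) =====
theorem votos_partido_spec : Claim_equal_votos_partido := by
  intro votos partido _
  unfold Spec_votos_partido votos_partido votos_partido_alt
  have hA := pvGoA_eq (votos.toList ++ ['$']) partido.toList (votos.toList ++ ['$']).length 0 0 0
    le_rfl (by omega) (by omega)
  rw [hA]
  simp only [List.drop_zero, zero_add, List.take_zero, Nat.sub_self]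
  rw [pvCnt_toks]
  have hsplit : PySem.Str.split? votos "$" =
      some (((pvToks votos.toList).1 :: (pvToks votos.toList).2).map String.ofList) := by
    rw [PySem.Str.split?]
    simp [PySem.Chars.split?, pvSplitOn_eq]
  rw [hsplit]
  simp only [Option.getD_some, List.nil_append]
  rw [pvCount_map_ofList]
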